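-- pv_equiv track=rewrite | github.com/yuanjieyue/cs5700_fundamentals_of_computer_networking | assignment5/util.py | parse_snake_pos
-- ===== SOURCE A (Python) =====
-- def parse_snake_pos(snake):
--     positions = []
--     rows = len(snake)
--     for r in range(rows):
--         row = snake[r]
--         # row is an integer, find out all the indices of set bit
--         for c in range(32):
--             mask = 1 << (31 - c)
--             if row & mask:
--                 pos = (c, r)
--                 positions.append(pos)
--     return positions
-- ===== SOURCE B (Python) =====
-- def parse_snake_pos(snake):
--     positions = []
--     for r, row in enumerate(snake):
--         m = row & 0xFFFFFFFF          # low 32 bits, exactly the bits A's masks can see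
--         while m:
--             b = m.bit_length() - 1    # highest set bit -> smallest column first
--             positions.append((31 - b, r))
--             m -= 1 << b               # clear that bit
--     return positions
-- ===== Notes on version B (the rewrite author's own statement) =====
-- stated objective: alternative
-- what changed: Replaces the fixed 32-iteration mask scan per row by a value-driven loop that masks the row to 32 bits once and then repeatedly peels the highest set bit via bit_length, emitting columns high-bit-first; rows iterate via enumerate instead of range-indexing.
import Mathlib
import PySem

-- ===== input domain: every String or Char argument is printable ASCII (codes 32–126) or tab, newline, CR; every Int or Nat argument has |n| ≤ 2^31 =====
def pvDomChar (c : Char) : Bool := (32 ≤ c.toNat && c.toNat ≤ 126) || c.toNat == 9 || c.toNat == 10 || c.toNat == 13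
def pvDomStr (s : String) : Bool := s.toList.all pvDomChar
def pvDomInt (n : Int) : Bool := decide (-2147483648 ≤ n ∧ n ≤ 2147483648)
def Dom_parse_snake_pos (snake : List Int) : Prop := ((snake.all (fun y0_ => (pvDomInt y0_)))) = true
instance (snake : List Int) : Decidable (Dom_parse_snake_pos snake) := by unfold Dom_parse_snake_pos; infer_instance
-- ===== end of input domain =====

-- B replaces A's fixed 32-step mask scan per row by masking the row once and repeatedly
-- peeling its highest set bit via bit_length (objective: alternative algorithm).

-- ===== PORT A =====
def parse_snake_pos (snake : List Int) : List (Int × Int) :=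
  let rows : Int := PySem.List.len snake
  (PySem.List.pyRange 0 rows 1).foldl (fun positions r =>
    let row := PySem.List.pyGetD snake r 0   -- snake[r]; r ∈ range(len(snake)) is always in range
    (PySem.List.pyRange 0 32 1).foldl (fun positions c =>
      let mask : Int := 1 <<< (31 - c).toNat -- 1 << (31 - c); exact: 0 ≤ 31 - c for c ∈ range(32)
      if PySem.Int.band row mask ≠ 0 then positions ++ [(c, r)] else positions)
      positions) []

-- ===== PORT B =====
-- the while-loop of Source B: peel the highest set bit of the masked row value until zero
def pvPeel (r : Int) (m : Nat) : List (Int × Int) :=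
  if h : m = 0 then []
  else
    let b : Nat := PySem.Int.bitLength (m : Int) - 1   -- b = m.bit_length() - 1
    (31 - (b : Int), r) :: pvPeel r (m - 2 ^ b)        -- append (31 - b, r); m -= 1 << b
termination_by m
decreasing_by
  have h1 : 0 < 2 ^ (PySem.Int.bitLength ((m : Nat) : Int) - 1) := by positivity
  omega

def parse_snake_pos_alt (snake : List Int) : List (Int × Int) :=
  (PySem.List.enumerate snake).foldl
    (fun positions p =>
      positions ++ pvPeel p.1 ((PySem.Int.band p.2 4294967295).toNat))  -- m = row & 0xFFFFFFFF ≥ 0, toNat exact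
    []

-- ===== PRECONDITION & SPEC =====
def Spec_parse_snake_pos (snake : List Int) (out : List (Int × Int)) : Prop := out = parse_snake_pos_alt snake
instance (snake : List Int) (out : List (Int × Int)) : Decidable (Spec_parse_snake_pos snake out) := by unfold Spec_parse_snake_pos; infer_instance

-- ===== CLAIM (what is proved, stated in full; the proofs are below) =====
def Claim_equal_parse_snake_pos : Prop := ∀ (snake : List Int), Dom_parse_snake_pos snake → Spec_parse_snake_pos snake (parse_snake_pos snake)

-- ===== LEMMAS AND PROOFS =====

-- "bit k of the integer a" in Python's infinite-two's-complement reading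
def pvBit (a : Int) (k : Nat) : Bool :=
  if 0 ≤ a then a.toNat.testBit k else !((-a - 1).toNat.testBit k)

theorem pv_lit : (4294967295 : Int).toNat = 2 ^ 32 - 1 := by decide

theorem pv_ldiff_add_and (x n : Nat) : x.ldiff n + (x &&& n) = x := by
  induction x using Nat.binaryRec generalizing n with
  | zero => apply Nat.eq_of_testBit_eq; simp [Nat.testBit_ldiff]
  | bit a m ih =>
      induction n using Nat.bitCasesOn with
      | bit b n =>
        rw [Nat.ldiff_bit, Nat.land_bit, Nat.bit_val, Nat.bit_val, Nat.bit_val]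
        have h := ih n
        cases a <;> cases b <;>
          simp only [Bool.and_false, Bool.and_true, Bool.not_false, Bool.not_true,
            Bool.toNat_true, Bool.toNat_false] <;> omega

theorem pv_sub_and (x n : Nat) : x - (x &&& n) = x.ldiff n := by
  have := pv_ldiff_add_and x n; omega

theorem pv_toNat_two_pow (k : Nat) : ((2 : Int) ^ k).toNat = 2 ^ k := by
  have h : ((2 : Int) ^ k) = ((2 ^ k : Nat) : Int) := by push_cast; ring
  rw [h, Int.toNat_natCast]

-- a & (1 << k) is nonzero exactly when Python's bit k of a is set
theorem pv_band_two_pow (a : Int) (k : Nat) :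
    (PySem.Int.band a ((2 : Int) ^ k) ≠ 0) ↔ pvBit a k = true := by
  have hpow : (0 : Int) ≤ 2 ^ k := by positivity
  have hposN : 0 < 2 ^ k := Nat.pow_pos (by norm_num)
  unfold PySem.Int.band pvBit
  by_cases ha : 0 ≤ a
  · rw [if_pos ha, if_pos hpow, if_pos ha, pv_toNat_two_pow, Nat.and_two_pow]
    cases a.toNat.testBit k <;> simp
  · rw [if_neg ha, if_pos hpow, if_neg ha, pv_toNat_two_pow, Nat.two_pow_and]
    cases (-a - 1).toNat.testBit k <;> simp

-- the bits of the masked value a & 0xFFFFFFFF below 32 are exactly Python's bits of a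
theorem pv_mask_testBit (a : Int) (k : Nat) (hk : k < 32) :
    ((PySem.Int.band a 4294967295).toNat).testBit k = pvBit a k := by
  have hnn : (0 : Int) ≤ 4294967295 := by norm_num
  unfold PySem.Int.band pvBit
  by_cases ha : 0 ≤ a
  · rw [if_pos ha, if_pos hnn, if_pos ha, Int.toNat_natCast, pv_lit,
      Nat.and_two_pow_sub_one_eq_mod, Nat.testBit_mod_two_pow]
    simp [hk]
  · rw [if_neg ha, if_pos hnn, if_neg ha, Int.toNat_natCast, pv_lit,
      pv_sub_and, Nat.testBit_ldiff, Nat.testBit_two_pow_sub_one]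
    simp [hk]

theorem pv_mask_lt (a : Int) : (PySem.Int.band a 4294967295).toNat < 2 ^ 32 := by
  have hnn : (0 : Int) ≤ 4294967295 := by norm_num
  unfold PySem.Int.band
  by_cases ha : 0 ≤ a
  · rw [if_pos ha, if_pos hnn, Int.toNat_natCast, pv_lit, Nat.and_two_pow_sub_one_eq_mod]
    exact lt_of_lt_of_le (Nat.mod_lt _ (by norm_num)) (le_refl _)
  · rw [if_neg ha, if_pos hnn, Int.toNat_natCast, pv_lit]
    omega

-- the set bits of m below k, listed from high to low
def pvRefBits (k : Nat) (m : Nat) : List Nat :=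
  match k with
  | 0 => []
  | k + 1 => (if m.testBit k then [k] else []) ++ pvRefBits k m

theorem pvRefBits_zero (k : Nat) : pvRefBits k 0 = [] := by
  induction k with
  | zero => rfl
  | succ k ih => simp [pvRefBits, ih]

theorem pvRefBits_congr (k : Nat) (m₁ m₂ : Nat)
    (h : ∀ j, j < k → m₁.testBit j = m₂.testBit j) : pvRefBits k m₁ = pvRefBits k m₂ := by
  induction k with
  | zero => rfl
  | succ k ih =>
      simp only [pvRefBits, h k (by omega), ih (fun j hj => h j (by omega))]

theorem pvRefBits_high (k b : Nat) (m : Nat) (hk : b + 1 ≤ k) (hm : m < 2 ^ (b + 1)) :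
    pvRefBits k m = pvRefBits (b + 1) m := by
  induction k with
  | zero => omega
  | succ k ih =>
      rcases Nat.lt_or_ge (b + 1) (k + 1) with h | h
      · have hbit : m.testBit k = false :=
          Nat.testBit_eq_false_of_lt (lt_of_lt_of_le hm (Nat.pow_le_pow_right (by norm_num) (by omega)))
        simp [pvRefBits, hbit, ih (by omega)]
      · have h2 : k + 1 = b + 1 := by omega
        rw [h2]

theorem pvRefBits_mem (k m b : Nat) (hb : b ∈ pvRefBits k m) : b < k := by
  induction k with
  | zero => simp [pvRefBits] at hb
  | succ k ih =>
      simp only [pvRefBits, List.mem_append] at hb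
      rcases hb with hb | hb
      · split at hb <;> simp_all
      · have := ih hb; omega

-- B's peel loop lists the set bits of m high-to-low
theorem pvPeel_eq_refBits (r : Int) (m : Nat) (k : Nat) (hm : m < 2 ^ k) :
    pvPeel r m = (pvRefBits k m).map (fun b : Nat => (31 - (b : Int), r)) := by
  induction m using Nat.strong_induction_on generalizing k with
  | _ m ih =>
    by_cases h0 : m = 0
    · subst h0; rw [pvPeel]; simp [pvRefBits_zero]
    · have hne : (m : Int) ≠ 0 := by exact_mod_cast h0
      set b : Nat := PySem.Int.bitLength (m : Int) - 1 with hb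
      have hle : 2 ^ b ≤ m := by
        have := PySem.Int.two_pow_bitLength_le (m : Int) hne
        simpa using this
      have hBLpos : 1 ≤ PySem.Int.bitLength (m : Int) := by
        by_contra hc
        have h0' : PySem.Int.bitLength (m : Int) = 0 := by omega
        have h2 := PySem.Int.lt_two_pow_bitLength (m : Int)
        rw [h0'] at h2
        simp at h2
        omega
      have hlt : m < 2 ^ (b + 1) := by
        have h2 := PySem.Int.lt_two_pow_bitLength (m : Int)
        have hbl : b + 1 = PySem.Int.bitLength (m : Int) := by omega
        rw [hbl]
        simpa using h2
      have hbk : b + 1 ≤ k := by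
        by_contra hc
        have h2 : 2 ^ k ≤ 2 ^ b := Nat.pow_le_pow_right (by norm_num) (by omega)
        omega
      have hdiv : m / 2 ^ b = 1 := by
        apply Nat.div_eq_of_lt_le
        · simpa using hle
        · have h2 : 2 ^ (b + 1) = (1 + 1) * 2 ^ b := by ring
          omega
      have hbit : m.testBit b = true := by
        simp [Nat.testBit, Nat.shiftRight_eq_div_pow, hdiv]
      have hsub : m - 2 ^ b = m % 2 ^ b := by
        conv_rhs => rw [Nat.mod_def, hdiv]
        omega
      rw [pvPeel]
      simp only [h0, dite_false, ← hb]
      rw [pvRefBits_high k b m hbk hlt]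
      have hrec := ih (m - 2 ^ b) (Nat.sub_lt (Nat.pos_of_ne_zero h0) (by positivity)) b
        (by rw [hsub]; exact Nat.mod_lt _ (by positivity))
      have hcongr : pvRefBits b m = pvRefBits b (m - 2 ^ b) := by
        apply pvRefBits_congr
        intro j hj
        rw [hsub, Nat.testBit_mod_two_pow]
        simp [hj]
      simp [pvRefBits, hbit, hrec, ← hcongr]

-- mapping b ↦ 31-b over the high-to-low bit list gives A's ascending column list
theorem pvRefBits_map (m : Nat) (k : Nat) (hk : k ≤ 32) :
    (pvRefBits k m).map (fun b => 31 - b) =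
      (List.range' (32 - k) k).filter (fun c => m.testBit (31 - c)) := by
  induction k with
  | zero => rfl
  | succ k ih =>
      have h1 : 32 - (k + 1) + 1 = 32 - k := by omega
      have h2 : 31 - (32 - (k + 1)) = k := by omega
      rw [List.range'_succ, List.filter_cons]
      simp only [h2]
      rw [h1, ← ih (by omega)]
      cases hbit : m.testBit k <;> simp [pvRefBits, hbit]

-- per-row equivalence: A's 32-step inner scan equals B's peel of the masked value
theorem pv_row_eq (row r : Int) (acc : List (Int × Int)) :
    (PySem.List.pyRange 0 32 1).foldl (fun positions c =>
      let mask : Int := 1 <<< (31 - c).toNat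
      if PySem.Int.band row mask ≠ 0 then positions ++ [(c, r)] else positions) acc
    = acc ++ pvPeel r ((PySem.Int.band row 4294967295).toNat) := by
  set m : Nat := (PySem.Int.band row 4294967295).toNat with hm
  have hfold :
      (PySem.List.pyRange 0 32 1).foldl (fun positions c =>
        let mask : Int := 1 <<< (31 - c).toNat
        if PySem.Int.band row mask ≠ 0 then positions ++ [(c, r)] else positions) acc
      = (List.range 32).foldl (fun positions (c : Nat) =>
          if (fun (c : Nat) => m.testBit (31 - c)) c then
            positions ++ [((fun (c : Nat) => ((c : Int), r)) c)] else positions) acc := by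
    rw [PySem.List.pyRange_one]
    norm_num
    rw [List.foldl_map]
    apply PySem.List.foldl_congr_mem
    intro positions c hc
    have hc32 : c < 32 := List.mem_range.mp hc
    have htn : ((31 : Int) - (c : Int)).toNat = 31 - c := by omega
    have hsh : (1 : Int) <<< (31 - c) = (2 : Int) ^ (31 - c) := by
      rw [Int.shiftLeft_eq]; ring
    simp only [htn, hsh]
    by_cases hbit : m.testBit (31 - c) = true
    · have hband := (pv_band_two_pow row (31 - c)).mpr
        (by rw [← pv_mask_testBit row (31 - c) (by omega), ← hm]; exact hbit)
      simp [hband, hbit]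
    · have hb : pvBit row (31 - c) = false := by
        have h3 := pv_mask_testBit row (31 - c) (by omega)
        rw [← hm] at h3
        simp only [Bool.not_eq_true] at hbit
        rw [← h3]; exact hbit
      have hband : ¬ (PySem.Int.band row ((2 : Int) ^ (31 - c)) ≠ 0) := by
        rw [pv_band_two_pow]; simp [hb]
      simp [hband, hbit]
  rw [hfold, PySem.List.foldl_append_if]
  congr 1
  rw [pvPeel_eq_refBits r m 32 (by rw [hm]; exact pv_mask_lt row)]
  have h1 : (pvRefBits 32 m).map (fun b : Nat => (31 - (b : Int), r))
      = ((pvRefBits 32 m).map (fun b => 31 - b)).map (fun (c : Nat) => ((c : Int), r)) := by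
    rw [List.map_map]
    apply List.map_congr_left
    intro b hb
    have hb32 : b < 32 := pvRefBits_mem 32 m b hb
    have hc : ((31 : Int) - (b : Int)) = (((31 - b : Nat) : Int)) := by omega
    simp [Function.comp, hc]
  rw [h1, pvRefBits_map m 32 (le_refl _)]
  have h2 : List.range' (32 - 32) 32 = List.range 32 := by
    norm_num [List.range_eq_range']
  rw [h2]

-- ===== VERDICT (by name: the statement is the Claim_ definition above) =====
theorem parse_snake_pos_spec : Claim_equal_parse_snake_pos := by
  intro snake _
  unfold Spec_parse_snake_pos parse_snake_pos parse_snake_pos_alt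
  rw [PySem.List.enumerate_eq_map_pyRange snake 0, List.foldl_map]
  apply PySem.List.foldl_congr_mem
  intro acc j _
  exact pv_row_eq (PySem.List.pyGetD snake j 0) j acc
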